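-- pv_equiv track=rewrite | github.com/aijinsol/coding-tests | 프로그래머스/lv2/42586. 기능개발/기능개발.py | solution
-- ===== SOURCE A (Python) =====
-- from collections import deque
-- from collections import deque
--
-- def solution(progresses, speeds):
--     # 1) Determine the number of days required for each task.
--     work_days = deque()
--     for idx, progress in enumerate(progresses):
--         n = 1
--         while progress + speeds[idx] * n < 100:
--             n += 1
--         work_days.append(n)
--
--     # 2) Identify the number of tasks being deployed per date.
--     idx = 1
--     ans = []
--     len_check = len(work_days)
--     while work_days:
--         pivot = work_days[0]
--         if len(work_days) == 1:
--             ans.append(1)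
--             break
--         if pivot < work_days[idx]:
--             ans.append(idx)
--             for _ in range(idx):
--                 work_days.popleft()
--             idx = 1
--         else:
--             idx += 1
--             if sum(ans) + idx == len_check:
--                 ans.append(idx)
--                 break
--
--     return ans
-- ===== SOURCE B (Python) =====
-- def solution(progresses, speeds):
--     # days[i] = first day on which task i is complete (ceiling division, min 1)
--     days = [1 if p + s >= 100 else -((p - 100) // s)
--             for p, s in zip(progresses, speeds)]
--     if not days:
--         return []
--     ans = []
--     deadline = days[0]
--     count = 0
--     for d in days:
--         if d <= deadline:
--             count += 1
--         else:
--             ans.append(count)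
--             deadline = d
--             count = 1
--     ans.append(count)
--     return ans
-- ===== Notes on version B (the rewrite author's own statement) =====
-- stated objective: simpler
-- what changed: Replaces A's per-task incrementing while-loop with one ceiling-division formula and replaces the deque/popleft/sum(ans) grouping loop with a single sweep keeping a deadline and a counter.
-- outside the precondition, e.g. on solution([50], [0]): A does not finish within the time limit, B raises ZeroDivisionError; on solution([10, 10], [10]): A raises IndexError, B returns [1]
import Mathlib
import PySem

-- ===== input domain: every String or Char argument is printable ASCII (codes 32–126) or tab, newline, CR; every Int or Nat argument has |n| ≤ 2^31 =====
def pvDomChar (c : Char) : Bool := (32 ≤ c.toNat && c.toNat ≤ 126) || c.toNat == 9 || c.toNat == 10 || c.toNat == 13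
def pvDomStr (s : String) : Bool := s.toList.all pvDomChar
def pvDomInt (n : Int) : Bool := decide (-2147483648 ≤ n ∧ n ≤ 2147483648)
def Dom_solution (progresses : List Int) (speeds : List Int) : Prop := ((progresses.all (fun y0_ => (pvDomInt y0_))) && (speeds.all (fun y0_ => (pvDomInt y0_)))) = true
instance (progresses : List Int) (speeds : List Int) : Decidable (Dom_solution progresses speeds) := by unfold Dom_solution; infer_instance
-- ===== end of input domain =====

-- B replaces A's per-task while-loop by a ceiling-division formula and A's deque/popleft/sum(ans)
-- grouping loop by a single sweep with a deadline and a counter (objective: simpler).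

-- ===== PORT A =====
-- 'n = 1; while progress + speeds[idx] * n < 100: n += 1' — fuel (100 - p).toNat + 1 is enough
-- whenever the Python loop terminates (Pre_); pyGetD is a totality guard (Pre_ keeps the index in range).
def whileLoop (p s : Int) : Nat → Int → Int
  | 0, n => n
  | f + 1, n => if p + s * n < 100 then whileLoop p s f (n + 1) else n

def workDays (progresses speeds : List Int) : List Int :=
  (PySem.List.enumerate progresses).foldl
    (fun acc pr => acc ++ [whileLoop pr.2 (PySem.List.pyGetD speeds pr.1 0) ((100 - pr.2).toNat + 1) 1]) []

-- the 'while work_days' loop; fuel 2*len+2 is enough (each step pops ≥ 1 element or increments idx,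
-- and idx never exceeds the remaining length); pyGetD/toNat are totality guards only.
def loopA : Nat → List Int → Int → Int → List Int → List Int
  | 0, _, _, _, ans => ans
  | f + 1, w, lenCheck, idx, ans =>
    match w with
    | [] => ans
    | pivot :: _ =>
      if w.length = 1 then ans ++ [1]
      else if pivot < PySem.List.pyGetD w idx 0 then
        loopA f (w.drop idx.toNat) lenCheck 1 (ans ++ [idx])
      else if ans.sum + (idx + 1) = lenCheck then ans ++ [idx + 1]
      else loopA f w lenCheck (idx + 1) ans

def solution (progresses : List Int) (speeds : List Int) : List Int :=
  loopA (2 * (workDays progresses speeds).length + 2) (workDays progresses speeds)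
    ((workDays progresses speeds).length : Int) 1 []

-- ===== PORT B =====
def dayF (p s : Int) : Int := if 100 ≤ p + s then 1 else -(PySem.Int.floordiv (p - 100) s)

def altGo : List Int → Int → Int → List Int → List Int
  | [], _, count, ans => ans ++ [count]
  | d :: rest, deadline, count, ans =>
    if d ≤ deadline then altGo rest deadline (count + 1) ans
    else altGo rest d 1 (ans ++ [count])

def daysB (progresses : List Int) (speeds : List Int) : List Int :=
  (progresses.zip speeds).map (fun pr => dayF pr.1 pr.2)

-- 'if not days: return []', then 'deadline = days[0]' (pyGetD: the index-0 access on a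
-- nonempty list never raises) and the sweep over days.
def solution_alt (progresses : List Int) (speeds : List Int) : List Int :=
  if daysB progresses speeds = [] then []
  else altGo (daysB progresses speeds)
    (PySem.List.pyGetD (daysB progresses speeds) 0 0) 0 []

-- ===== PRECONDITION & SPEC =====
-- Pre_ excludes exactly the inputs on which A does not return: speeds shorter than progresses
-- (IndexError) and a task with non-positive speed that is not already done in one day (the
-- while-loop diverges).
def Pre_solution (progresses : List Int) (speeds : List Int) : Prop :=
  progresses.length ≤ speeds.length ∧
  ∀ pr ∈ progresses.zip speeds, 1 ≤ pr.2 ∨ 100 ≤ pr.1 + pr.2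
instance (progresses : List Int) (speeds : List Int) : Decidable (Pre_solution progresses speeds) := by
  unfold Pre_solution; infer_instance

def pvWitness_solution : List Int × List Int := ([93, 30, 55], [1, 30, 5])

def Spec_solution (progresses : List Int) (speeds : List Int) (out : List Int) : Prop := out = solution_alt progresses speeds
instance (progresses : List Int) (speeds : List Int) (out : List Int) : Decidable (Spec_solution progresses speeds out) := by unfold Spec_solution; infer_instance

-- ===== CLAIM (what is proved, stated in full; the proofs are below) =====
def Claim_equal_solution : Prop := ∀ (progresses : List Int) (speeds : List Int), Dom_solution progresses speeds → Pre_solution progresses speeds → Spec_solution progresses speeds (solution progresses speeds)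

-- ===== LEMMAS AND PROOFS =====

-- the common grouping specification: group sizes, a group ends at the first day > its first day
def G : List Int → List Int
  | [] => []
  | d :: rest =>
    (1 + ((rest.takeWhile (· ≤ d)).length : Int)) :: G (rest.dropWhile (· ≤ d))
termination_by l => l.length
decreasing_by
  simp only [List.length_cons]
  exact Nat.lt_succ_of_le (List.length_dropWhile_le _ _)

-- ---- phase 1: the while-loop equals the ceiling formula ----
lemma whileLoop_eq_N (p s N : Int) (hs : 1 ≤ s)
    (h1 : (N - 1) * s < 100 - p) (h2 : 100 - p ≤ N * s) :
    ∀ (f : Nat) (n : Int), 1 ≤ n → n ≤ N → (N - n).toNat ≤ f → whileLoop p s f n = N := by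
  intro f
  induction f with
  | zero =>
    intro n h1n hnN hf
    have : n = N := by omega
    simp [whileLoop, this]
  | succ f ih =>
    intro n h1n hnN hf
    rw [whileLoop]
    by_cases hc : p + s * n < 100
    · rw [if_pos hc]
      have hlt : n < N := by
        by_contra h
        have : N ≤ n := by omega
        nlinarith
      exact ih (n + 1) (by omega) (by omega) (by omega)
    · rw [if_neg hc]
      have : ¬ n < N := by
        intro h
        have hns : n * s ≤ (N - 1) * s := by nlinarith
        nlinarith
      omega

lemma day_correct (p s : Int) (h : 1 ≤ s ∨ 100 ≤ p + s) :
    whileLoop p s ((100 - p).toNat + 1) 1 = dayF p s := by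
  by_cases hdone : 100 ≤ p + s
  · have hx : ¬ (p + s * 1 < 100) := by omega
    rw [whileLoop, if_neg hx, dayF, if_pos hdone]
  · have hs : 1 ≤ s := by tauto
    set N : Int := -(PySem.Int.floordiv (p - 100) s) with hNdef
    have hbr : (N - 1) * s < 100 - p ∧ 100 - p ≤ N * s := by
      have heq : -(PySem.Int.floordiv (-(100 - p)) s) = N := by
        rw [neg_sub]
      exact (PySem.Int.neg_floordiv_neg_eq_iff_of_pos (by omega)).mp heq
    have h1N : 1 < N := by
      by_contra h
      have : N ≤ 1 := by omega
      nlinarith [hbr.2]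
    have hNle : N ≤ 100 - p := by
      nlinarith [hbr.1]
    rw [dayF, if_neg hdone]
    exact whileLoop_eq_N p s N hs hbr.1 hbr.2 _ 1 (by omega) (by omega) (by omega)

lemma workDays_aux (ψ : List Int) :
    ∀ (k : Nat) (ss : List Int) (acc : List Int),
      ψ.length + k ≤ ss.length →
      (∀ pr ∈ ψ.zip (ss.drop k), 1 ≤ pr.2 ∨ 100 ≤ pr.1 + pr.2) →
      (PySem.List.enumerate ψ (k : Int)).foldl
        (fun acc pr => acc ++ [whileLoop pr.2 (PySem.List.pyGetD ss pr.1 0) ((100 - pr.2).toNat + 1) 1]) acc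
      = acc ++ (ψ.zip (ss.drop k)).map (fun pr => dayF pr.1 pr.2) := by
  induction ψ with
  | nil => intro k ss acc _ _; simp [PySem.List.enumerate_nil]
  | cons p ps ih =>
    intro k ss acc hlen hok
    have hk : k < ss.length := by simp at hlen; omega
    have hdrop : ss.drop k = ss[k] :: ss.drop (k + 1) := List.drop_eq_getElem_cons hk
    rw [hdrop] at hok ⊢
    rw [List.zip_cons_cons] at hok ⊢
    rw [PySem.List.enumerate_cons, List.foldl_cons]
    have hgd : PySem.List.pyGetD ss (k : Int) 0 = ss[k] := by
      rw [PySem.List.pyGetD_eq_getElem ss 0 (by omega) (by exact_mod_cast hk)]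
      simp
    have hstep : whileLoop p (PySem.List.pyGetD ss (k : Int) 0) ((100 - p).toNat + 1) 1
        = dayF p ss[k] := by
      rw [hgd]
      exact day_correct p ss[k] (hok _ (List.mem_cons_self))
    have hcast : ((k : Int) + 1) = ((k + 1 : Nat) : Int) := by push_cast; ring
    rw [hstep, hcast, ih (k + 1) ss (acc ++ [dayF p ss[k]])
      (by simp at hlen ⊢; omega)
      (by intro pr hpr; exact hok pr (List.mem_cons_of_mem _ hpr))]
    simp

lemma workDays_eq (ps ss : List Int) (h : Pre_solution ps ss) :
    workDays ps ss = daysB ps ss := by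
  rw [daysB]
  have := workDays_aux ps 0 ss [] (by simpa using h.1) (by simpa using h.2)
  simpa [workDays, PySem.List.enumerate] using this

-- ---- phase 2 of B: the sweep equals G ----
lemma altGo_eq (rest : List Int) :
    ∀ (d count : Int) (ans : List Int),
      altGo rest d count ans
        = ans ++ ((count + ((rest.takeWhile (· ≤ d)).length : Int))
            :: G (rest.dropWhile (· ≤ d))) := by
  induction rest with
  | nil => intro d count ans; simp [altGo, G]
  | cons x xs ih =>
    intro d count ans
    rw [altGo]
    by_cases hx : x ≤ d
    · rw [if_pos hx, ih, List.takeWhile_cons_of_pos (by simpa using hx),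
        List.dropWhile_cons_of_pos (by simpa using hx)]
      simp only [List.length_cons]
      push_cast
      ring_nf
    · rw [if_neg hx, ih]
      have hG : G (x :: xs)
          = (1 + ((xs.takeWhile (· ≤ x)).length : Int)) :: G (xs.dropWhile (· ≤ x)) := by
        rw [G]
      rw [List.takeWhile_cons_of_neg (by simpa using hx),
        List.dropWhile_cons_of_neg (by simpa using hx), hG]
      simp

lemma alt_eq_G (days : List Int) (d0 : Int) (rest : List Int) (hd : days = d0 :: rest) :
    altGo days d0 0 [] = G days := by
  subst hd
  rw [altGo, if_pos le_rfl, altGo_eq]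
  rw [G]
  simp

-- ---- phase 2 of A: the deque loop equals G ----
lemma loopA_eq (fuel : Nat) :
    ∀ (w : List Int) (lenCheck idx : Int) (ans : List Int),
      w ≠ [] → 1 ≤ idx →
      (idx < w.length ∨ (idx = 1 ∧ w.length = 1)) →
      ans.sum + (w.length : Int) = lenCheck →
      2 * w.length + 1 ≤ fuel + idx.toNat →
      loopA fuel w lenCheck idx ans
        = ans ++ ((idx + (((w.drop idx.toNat).takeWhile (· ≤ w.getD 0 0)).length : Int))
            :: G ((w.drop idx.toNat).dropWhile (· ≤ w.getD 0 0))) := by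
  induction fuel with
  | zero =>
    intro w lenCheck idx ans hne h1 hidx _ hfuel
    exfalso
    have hw : w.length ≠ 0 := fun h => hne (List.length_eq_zero_iff.mp h)
    omega
  | succ f ih =>
    intro w lenCheck idx ans hne h1 hidx hsum hfuel
    obtain ⟨pivot, tail, rfl⟩ := List.exists_cons_of_ne_nil hne
    rw [loopA]
    by_cases hlen1 : (pivot :: tail).length = 1
    · rw [if_pos hlen1]
      have htail : tail = [] := by
        simpa using List.length_eq_zero_iff.mp (by simpa using hlen1)
      have hidx1 : idx = 1 := by
        rcases hidx with h | h
        · simp [htail] at h; omega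
        · exact h.1
      subst htail hidx1
      simp [G]
    · rw [if_neg hlen1]
      have hL : idx < (pivot :: tail).length := by
        rcases hidx with h | h
        · exact h
        · exact absurd h.2 hlen1
      have hidxnn : (0 : Int) ≤ idx := by omega
      have hlt : idx.toNat < (pivot :: tail).length := by omega
      have hget : PySem.List.pyGetD (pivot :: tail) idx 0 = (pivot :: tail)[idx.toNat] :=
        PySem.List.pyGetD_eq_getElem _ 0 hidxnn (by omega)
      have hdropc : (pivot :: tail).drop idx.toNat
          = (pivot :: tail)[idx.toNat] :: (pivot :: tail).drop (idx.toNat + 1) :=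
        List.drop_eq_getElem_cons hlt
      by_cases hpiv : pivot < PySem.List.pyGetD (pivot :: tail) idx 0
      · rw [if_pos hpiv]
        have hlc : (pivot :: tail).length = tail.length + 1 := by simp
        have hgt : ¬ ((pivot :: tail)[idx.toNat] ≤ pivot) := by
          rw [hget] at hpiv; omega
        set w' := (pivot :: tail).drop idx.toNat with hw'
        have hw'len : w'.length = tail.length + 1 - idx.toNat := by
          simp [hw']
        have hw'ne : w' ≠ [] := by
          intro h
          have := congrArg List.length h
          rw [hw'len] at this
          simp at this
          omega
        obtain ⟨d', rest', hd'⟩ := List.exists_cons_of_ne_nil hw'ne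
        obtain ⟨hd1, hd2⟩ := List.cons_eq_cons.mp (hd'.symm.trans hdropc)
        have hrec := ih w' lenCheck 1 (ans ++ [idx]) hw'ne le_rfl
          (by rw [hw'len]; omega)
          (by simp [List.sum_append, hw'len]; omega)
          (by rw [hw'len]; omega)
        rw [hrec, hd']
        simp only [List.getD_cons_zero, Int.toNat_one, List.drop_one, List.tail_cons]
        have htw : List.takeWhile (fun x => decide (x ≤ pivot)) w' = [] := by
          rw [hd']
          exact List.takeWhile_cons_of_neg (by simpa [hd1] using hgt)
        have hdw : List.dropWhile (fun x => decide (x ≤ pivot)) w' = w' := by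
          rw [hd', List.dropWhile_cons_of_neg (by simpa [hd1] using hgt)]
        have hG : G (d' :: rest')
            = (1 + ((rest'.takeWhile (· ≤ d')).length : Int)) :: G (rest'.dropWhile (· ≤ d')) := by
          rw [G]
        have htw2 : List.takeWhile (fun x => decide (x ≤ pivot)) (d' :: rest') = [] := by
          rw [← hd']; exact htw
        have hdw2 : List.dropWhile (fun x => decide (x ≤ pivot)) (d' :: rest') = d' :: rest' := by
          rw [← hd']; exact hdw
        rw [← hG, htw2, hdw2]
        simp
      · rw [if_neg hpiv]
        have hle : (pivot :: tail)[idx.toNat] ≤ pivot := by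
          rw [hget] at hpiv; omega
        have htw : ((pivot :: tail).drop idx.toNat).takeWhile (· ≤ (pivot :: tail).getD 0 0)
            = (pivot :: tail)[idx.toNat]
              :: (((pivot :: tail).drop (idx.toNat + 1)).takeWhile (· ≤ (pivot :: tail).getD 0 0)) := by
          rw [hdropc]
          exact List.takeWhile_cons_of_pos (by simpa [List.getD_cons_zero] using hle)
        have hdw : ((pivot :: tail).drop idx.toNat).dropWhile (· ≤ (pivot :: tail).getD 0 0)
            = ((pivot :: tail).drop (idx.toNat + 1)).dropWhile (· ≤ (pivot :: tail).getD 0 0) := by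
          rw [hdropc]
          exact List.dropWhile_cons_of_pos (by simpa [List.getD_cons_zero] using hle)
        by_cases hbrk : ans.sum + (idx + 1) = lenCheck
        · rw [if_pos hbrk]
          have hlast : idx + 1 = ((pivot :: tail).length : Int) := by omega
          have hdropnil : (pivot :: tail).drop (idx.toNat + 1) = [] := by
            apply List.drop_eq_nil_of_le; omega
          rw [htw, hdw, hdropnil]
          simp [G]
        · rw [if_neg hbrk]
          have hnext : idx + 1 < ((pivot :: tail).length : Int) := by omega
          have hrec := ih (pivot :: tail) lenCheck (idx + 1) ans hne (by omega)
            (by left; exact_mod_cast hnext) hsum (by omega)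
          have hco : (idx + 1).toNat = idx.toNat + 1 := by omega
          rw [hco] at hrec
          rw [hrec, htw, hdw]
          simp only [List.length_cons]
          push_cast
          ring_nf

-- ===== VERDICT (by name: the statement is the Claim_ definition above) =====
theorem solution_spec : Claim_equal_solution := by
  intro ps ss _ hPre
  unfold Spec_solution solution solution_alt
  rw [workDays_eq ps ss hPre]
  rcases hD : daysB ps ss with _ | ⟨d0, rest⟩
  · simp [loopA]
  · rw [if_neg (by simp), PySem.List.pyGetD_zero_cons,
      alt_eq_G (d0 :: rest) d0 rest rfl]
    have := loopA_eq (2 * (d0 :: rest).length + 2) (d0 :: rest)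
      ((d0 :: rest).length : Int) 1 [] (by simp) le_rfl
      (by rcases rest with _ | ⟨x, xs⟩
          · exact Or.inr ⟨rfl, rfl⟩
          · left
            simp only [List.length_cons]
            push_cast
            omega)
      (by simp) (by omega)
    simp only [List.nil_append] at this
    rw [this, G]
    norm_num
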